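-- pv_equiv track=rewrite | github.com/Seriousattempts/gmlm | Notes/Strip .jsonl to one folder.py | extract_objects
-- ===== SOURCE A (Python) =====
-- def extract_objects(raw: str):
--     """
--     Yield candidate top-level JSON object strings by brace matching,
--     ignoring braces inside strings and escapes.
--     """
--     objs = []
--     n = len(raw)
--     i = 0
--     in_string = False
--     escape = False
--     depth = 0
--     start = -1
--
--     while i < n:
--         ch = raw[i]
--
--         if in_string:
--             if escape:
--                 escape = False
--             elif ch == '\\':
--                 escape = True
--             elif ch == '"':
--                 in_string = False
--         else:
--             if ch == '"':
--                 in_string = True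
--             elif ch == '{':
--                 if depth == 0:
--                     start = i
--                 depth += 1
--             elif ch == '}':
--                 if depth > 0:
--                     depth -= 1
--                     if depth == 0 and start != -1:
--                         # complete top-level object
--                         objs.append(raw[start:i+1])
--                         start = -1
--         i += 1
--
--     return objs
-- ===== SOURCE B (Python) =====
-- def extract_objects(raw: str):
--     """
--     Collect candidate top-level JSON object strings by brace matching.
--     Strings are skipped by a dedicated inner scan instead of per-character
--     in_string/escape flags.
--     """
--     objs = []
--     n = len(raw)
--     i = 0
--     depth = 0
--     start = -1
--     while i < n:
--         ch = raw[i]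
--         if ch == '"':
--             # skip over the whole string literal in one sub-scan
--             i += 1
--             while i < n:
--                 c = raw[i]
--                 if c == '\\':
--                     i += 2
--                 elif c == '"':
--                     i += 1
--                     break
--                 else:
--                     i += 1
--             continue
--         if ch == '{':
--             if depth == 0:
--                 start = i
--             depth += 1
--         elif ch == '}':
--             if depth > 0:
--                 depth -= 1
--                 if depth == 0 and start != -1:
--                     objs.append(raw[start:i + 1])
--                     start = -1
--         i += 1
--     return objs
-- ===== Notes on version B (the rewrite author's own statement) =====
-- stated objective: alternative
-- what changed: Replaces A's per-character in_string/escape boolean state machine by a single depth/start loop that, on a quote, hands off to a dedicated inner sub-scan that jumps past the whole string literal (skipping two characters after a backslash).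
import Mathlib
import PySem

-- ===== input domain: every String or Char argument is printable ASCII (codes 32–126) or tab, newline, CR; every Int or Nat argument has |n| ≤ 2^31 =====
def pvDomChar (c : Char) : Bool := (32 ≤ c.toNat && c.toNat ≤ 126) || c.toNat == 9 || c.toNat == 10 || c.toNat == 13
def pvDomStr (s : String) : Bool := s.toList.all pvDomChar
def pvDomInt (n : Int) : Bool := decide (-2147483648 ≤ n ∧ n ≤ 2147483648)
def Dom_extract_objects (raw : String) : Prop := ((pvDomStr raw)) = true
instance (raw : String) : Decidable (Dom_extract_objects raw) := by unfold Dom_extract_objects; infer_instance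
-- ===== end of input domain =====

-- B replaces A's per-character in_string/escape state flags by a dedicated inner
-- string-skipping scan (a different decomposition; same cost).

-- ===== PORT A =====
-- A's while-loop: recursion over the remaining characters, carrying the index i
-- and the full state (in_string, escape, depth, start, objs). raw[start:i+1] is
-- PySem.List.slice on the original character list.
def extractLoopA (cs : List Char) (rest : List Char) (i : Nat) (inS esc : Bool)
    (depth start : Int) (objs : List String) : List String :=
  match rest with
  | [] => objs
  | ch :: rest' =>
    if inS then
      if esc then extractLoopA cs rest' (i+1) true false depth start objs
      else if ch = '\\' then extractLoopA cs rest' (i+1) true true depth start objs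
      else if ch = '"' then extractLoopA cs rest' (i+1) false esc depth start objs
      else extractLoopA cs rest' (i+1) true esc depth start objs
    else
      if ch = '"' then extractLoopA cs rest' (i+1) true esc depth start objs
      else if ch = '{' then
        extractLoopA cs rest' (i+1) inS esc (depth+1) (if depth = 0 then (i : Int) else start) objs
      else if ch = '}' then
        if depth > 0 then
          if depth - 1 = 0 ∧ start ≠ -1 then
            extractLoopA cs rest' (i+1) inS esc (depth-1) (-1)
              (objs ++ [String.ofList (PySem.List.slice cs (some start) (some ((i : Int)+1)))])
          else extractLoopA cs rest' (i+1) inS esc (depth-1) start objs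
        else extractLoopA cs rest' (i+1) inS esc depth start objs
      else extractLoopA cs rest' (i+1) inS esc depth start objs

def extract_objects (raw : String) : List String :=
  extractLoopA raw.toList raw.toList 0 false false 0 (-1) []

-- ===== PORT B =====
-- B's inner while-loop: advance past a string body; returns the new index and
-- the remaining characters ('\\' skips the following character too).
def skipString (i : Nat) (rest : List Char) : Nat × List Char :=
  match rest with
  | [] => (i, [])
  | c :: rest' =>
    if c = '\\' then skipString (i+2) rest'.tail
    else if c = '"' then (i+1, rest')
    else skipString (i+1) rest'
termination_by rest.length
decreasing_by
  all_goals simp [List.length_tail]; try omega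

theorem skipString_length_le (i : Nat) (rest : List Char) :
    (skipString i rest).2.length ≤ rest.length := by
  induction i, rest using skipString.induct
  all_goals (rw [skipString]; (try simp_all [List.length_tail]); try omega)

-- B's outer while-loop: only depth and start; a '"' hands off to skipString.
def extractLoopB (cs : List Char) (rest : List Char) (i : Nat)
    (depth start : Int) (objs : List String) : List String :=
  match rest with
  | [] => objs
  | ch :: rest' =>
    if ch = '"' then
      extractLoopB cs (skipString (i+1) rest').2 (skipString (i+1) rest').1 depth start objs
    else if ch = '{' then
      extractLoopB cs rest' (i+1) (depth+1) (if depth = 0 then (i : Int) else start) objs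
    else if ch = '}' then
      if depth > 0 then
        if depth - 1 = 0 ∧ start ≠ -1 then
          extractLoopB cs rest' (i+1) (depth-1) (-1)
            (objs ++ [String.ofList (PySem.List.slice cs (some start) (some ((i : Int)+1)))])
        else extractLoopB cs rest' (i+1) (depth-1) start objs
      else extractLoopB cs rest' (i+1) depth start objs
    else extractLoopB cs rest' (i+1) depth start objs
termination_by rest.length
decreasing_by
  · have := skipString_length_le (i+1) rest'; simp; omega
  all_goals simp

def extract_objects_alt (raw : String) : List String :=
  extractLoopB raw.toList raw.toList 0 0 (-1) []

-- ===== PRECONDITION & SPEC =====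
def Spec_extract_objects (raw : String) (out : List String) : Prop := out = extract_objects_alt raw
instance (raw : String) (out : List String) : Decidable (Spec_extract_objects raw out) := by unfold Spec_extract_objects; infer_instance

-- ===== CLAIM (what is proved, stated in full; the proofs are below) =====
def Claim_equal_extract_objects : Prop := ∀ (raw : String), Dom_extract_objects raw → Spec_extract_objects raw (extract_objects raw)

-- ===== LEMMAS AND PROOFS =====

-- Simultaneous simulation: outside a string A's loop equals B's loop; inside a
-- string (escape clear) A's loop equals B's loop resumed after skipString.
theorem loop_sim (cs : List Char) (n : Nat) :
    ∀ rest : List Char, rest.length ≤ n →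
      (∀ (i : Nat) (d s : Int) (o : List String),
          extractLoopA cs rest i false false d s o = extractLoopB cs rest i d s o) ∧
      (∀ (i : Nat) (d s : Int) (o : List String),
          extractLoopA cs rest i true false d s o =
            extractLoopB cs (skipString i rest).2 (skipString i rest).1 d s o) := by
  induction n with
  | zero =>
      intro rest hlen
      have h : rest = [] := List.eq_nil_of_length_eq_zero (Nat.le_zero.mp hlen)
      subst h
      constructor <;> intro i d s o <;> simp [extractLoopA, extractLoopB, skipString]
  | succ n ih =>
      intro rest hlen
      match rest with
      | [] => constructor <;> intro i d s o <;> simp [extractLoopA, extractLoopB, skipString]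
      | ch :: rest' =>
        have hr' : rest'.length ≤ n := by simp at hlen; omega
        constructor
        · intro i d s o
          rw [extractLoopA, extractLoopB]
          simp only [Bool.false_eq_true, if_false]
          by_cases hq : ch = '"'
          · simp only [if_pos hq]
            exact (ih rest' hr').2 (i+1) d s o
          · simp only [if_neg hq]
            by_cases hb : ch = '{'
            · simp only [if_pos hb]; exact (ih rest' hr').1 _ _ _ _
            · simp only [if_neg hb]
              by_cases hc : ch = '}'
              · simp only [if_pos hc]
                split_ifs <;> exact (ih rest' hr').1 _ _ _ _
              · simp only [if_neg hc]; exact (ih rest' hr').1 _ _ _ _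
        · intro i d s o
          rw [extractLoopA, skipString]
          by_cases he : ch = '\\'
          · -- escape: A consumes the next character unconditionally
            simp only [if_pos he]
            match rest' with
            | [] => simp [extractLoopA, skipString, extractLoopB]
            | c2 :: r2 =>
              rw [extractLoopA]
              simp only [List.tail_cons]
              have hr2 : r2.length ≤ n := by simp at hlen; omega
              exact (ih r2 hr2).2 (i+2) d s o
          · simp only [if_neg he]
            by_cases hq : ch = '"'
            · simp only [if_pos hq]
              exact (ih rest' hr').1 (i+1) d s o
            · simp only [if_neg hq]
              exact (ih rest' hr').2 (i+1) d s o

-- ===== VERDICT (by name: the statement is the Claim_ definition above) =====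
theorem extract_objects_spec : Claim_equal_extract_objects := by
  intro raw _
  unfold Spec_extract_objects extract_objects extract_objects_alt
  exact (loop_sim raw.toList raw.toList.length raw.toList le_rfl).1 0 0 (-1) []
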